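-- pv_equiv track=rewrite | github.com/Gonza-e/Aed- | a.py | patronDos
-- ===== SOURCE A (Python) =====
-- def patronDos(num,dig: int) -> bool:
--     if (num == 0) or ((num < 10) and (num % 10) == dig-2):
--         return True
--     else:
--         dig = num % 10
--         if (num//10) % 10 == dig-2:
--             return patronDos(num//10,dig)
--         else:
--             return False
-- ===== SOURCE B (Python) =====
-- def patronDos(num, dig: int) -> bool:
--     while num != 0:
--         d = num % 10
--         if num < 10 and d == dig - 2:
--             return True
--         if (num // 10) % 10 != d - 2:
--             return False
--         num, dig = num // 10, d
--     return True
-- ===== Notes on version B (the rewrite author's own statement) =====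
-- stated objective: simpler
-- what changed: Replaced A's tail recursion (with its combined or/and top test) by an explicit while-loop with early returns over the same digit recurrence.
import Mathlib
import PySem

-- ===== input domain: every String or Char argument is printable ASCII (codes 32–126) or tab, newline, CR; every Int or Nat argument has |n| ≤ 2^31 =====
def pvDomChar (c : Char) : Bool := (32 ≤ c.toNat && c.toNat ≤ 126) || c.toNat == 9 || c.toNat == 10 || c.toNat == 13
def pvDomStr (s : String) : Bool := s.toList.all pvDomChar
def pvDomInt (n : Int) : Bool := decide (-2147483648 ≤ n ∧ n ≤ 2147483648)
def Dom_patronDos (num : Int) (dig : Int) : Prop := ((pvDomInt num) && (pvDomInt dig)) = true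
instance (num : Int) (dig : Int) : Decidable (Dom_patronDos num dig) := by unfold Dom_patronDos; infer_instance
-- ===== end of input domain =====

-- B replaces A's tail recursion with an explicit while-loop over the same digit recurrence (objective: simpler/iterative; equal cost).

-- termination measure fact, cited by both ports' decreasing_by
theorem pv_floordiv10_natAbs_lt (num : Int) (h0 : num ≠ 0) (h1 : num ≠ -1) :
    (PySem.Int.floordiv num 10).natAbs < num.natAbs := by
  have he := PySem.Int.floordiv_mul_add_mod num 10
  have hn := PySem.Int.mod_nonneg num (b := 10) (by norm_num)
  have hl := PySem.Int.mod_lt num (b := 10) (by norm_num)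
  omega

-- ===== PORT A =====
-- literal transliteration of A's recursion
def patronDos (num : Int) (dig : Int) : Bool :=
  if num = 0 ∨ (num < 10 ∧ PySem.Int.mod num 10 = dig - 2) then
    true
  else
    let dig2 := PySem.Int.mod num 10
    if h : PySem.Int.mod (PySem.Int.floordiv num 10) 10 = dig2 - 2 then
      patronDos (PySem.Int.floordiv num 10) dig2
    else
      false
termination_by num.natAbs
decreasing_by
  refine pv_floordiv10_natAbs_lt num (fun e => ‹¬ _› (Or.inl e)) (fun e => ?_)
  subst e; revert h; decide

-- ===== PORT B =====
-- transliteration of Source B's `while num != 0:` loop body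
def pvAltLoop (num : Int) (dig : Int) : Bool :=
  if num ≠ 0 then
    let d := PySem.Int.mod num 10
    if num < 10 ∧ d = dig - 2 then
      true
    else if hc : PySem.Int.mod (PySem.Int.floordiv num 10) 10 ≠ d - 2 then
      false
    else
      pvAltLoop (PySem.Int.floordiv num 10) d
  else
    true
termination_by num.natAbs
decreasing_by
  refine pv_floordiv10_natAbs_lt num ‹num ≠ 0› (fun e => ?_)
  subst e; revert hc; decide

def patronDos_alt (num : Int) (dig : Int) : Bool := pvAltLoop num dig

-- ===== PRECONDITION & SPEC =====
def Spec_patronDos (num : Int) (dig : Int) (out : Bool) : Prop := out = patronDos_alt num dig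
instance (num : Int) (dig : Int) (out : Bool) : Decidable (Spec_patronDos num dig out) := by unfold Spec_patronDos; infer_instance

-- ===== CLAIM (what is proved, stated in full; the proofs are below) =====
def Claim_equal_patronDos : Prop := ∀ (num : Int) (dig : Int), Dom_patronDos num dig → Spec_patronDos num dig (patronDos num dig)

-- ===== LEMMAS AND PROOFS =====
theorem pv_eq_aux (n : Nat) : ∀ (num dig : Int), num.natAbs = n →
    patronDos num dig = pvAltLoop num dig := by
  induction n using Nat.strong_induction_on with
  | _ n IH =>
    intro num dig hn
    rw [patronDos, pvAltLoop]
    by_cases h0 : num = 0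
    · simp [h0]
    · by_cases hg : num / 10 % 10 = num % 10 - 2
      · have h1' : num ≠ -1 := by intro e; rw [e] at hg; norm_num at hg
        have hlt : (num / 10).natAbs < n := by
          have hfd := pv_floordiv10_natAbs_lt num h0 h1'
          rw [PySem.Int.floordiv_eq_ediv_of_pos (by norm_num : (0:Int) < 10)] at hfd
          omega
        have hrec := IH _ hlt (num / 10) (num % 10) rfl
        simp [h0, hrec]
      · simp [h0, hg]

-- ===== VERDICT (by name: the statement is the Claim_ definition above) =====
theorem patronDos_spec : Claim_equal_patronDos := by
  intro num dig _
  exact pv_eq_aux num.natAbs num dig rfl
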